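-- pv_equiv track=rewrite | github.com/edenxie-xgk/enterprise-repository | src/graph/service.py | _normalize_citations
-- ===== SOURCE A (Python) =====
-- def _normalize_citations(raw_citations, allowed_citations: list[str]) -> list[str]:
--     allowed_set = {item for item in allowed_citations if item}
--     normalized: list[str] = []
--     seen: set[str] = set()
--     for item in raw_citations or []:
--         citation = str(item).strip()
--         if not citation or citation not in allowed_set or citation in seen:
--             continue
--         seen.add(citation)
--         normalized.append(citation)
--     return normalized
-- ===== SOURCE B (Python) =====
-- def _normalize_citations(raw_citations, allowed_citations: list[str]) -> list[str]:
--     allowed = {x for x in allowed_citations if x}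
--     out: list[str] = []
--     pending = [str(x).strip() for x in (raw_citations or [])]
--     while pending:
--         s = pending[0]
--         pending = [t for t in pending[1:] if t != s]
--         if s and s in allowed:
--             out.append(s)
--     return out
-- ===== Notes on version B (the rewrite author's own statement) =====
-- stated objective: alternative
-- what changed: Replaces the fused seen-set loop by a nub-style filter-the-remainder algorithm: pre-strip everything, then repeatedly take the head, purge its later duplicates from the pending list by filtering, and emit it if non-empty and allowed -- no seen container at all.
import Mathlib
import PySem

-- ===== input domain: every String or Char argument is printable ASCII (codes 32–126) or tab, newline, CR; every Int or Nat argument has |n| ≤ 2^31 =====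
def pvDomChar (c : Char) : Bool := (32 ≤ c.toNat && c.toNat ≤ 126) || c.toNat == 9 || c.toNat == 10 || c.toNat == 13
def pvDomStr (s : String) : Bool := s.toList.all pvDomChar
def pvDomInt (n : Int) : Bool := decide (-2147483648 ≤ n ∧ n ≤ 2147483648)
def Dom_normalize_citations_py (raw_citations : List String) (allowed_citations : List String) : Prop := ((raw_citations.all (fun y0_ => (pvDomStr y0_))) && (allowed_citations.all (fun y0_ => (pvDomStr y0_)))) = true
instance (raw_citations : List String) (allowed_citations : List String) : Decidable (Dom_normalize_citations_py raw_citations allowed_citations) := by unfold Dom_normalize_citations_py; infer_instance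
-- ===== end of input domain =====

-- B replaces A's fused seen-set loop by a nub-style filter-the-remainder algorithm
-- (pre-strip, then repeatedly purge the head's later duplicates by list filtering); same result, no seen container.

-- ===== PORT A =====
-- literal port of A: set comprehension over allowed_citations, then one fused loop
-- carrying (normalized, seen) with a `continue` branch (loop body = pvStepA).
def pvStepA (allowed_set : PySem.Set String) (st : List String × PySem.Set String)
    (item : String) : List String × PySem.Set String :=
  let citation := PySem.Str.strip item
  if citation = "" ∨ ¬ (PySem.Set.contains allowed_set citation = true)
      ∨ PySem.Set.contains st.2 citation = true then
    st
  else
    (st.1 ++ [citation], PySem.Set.add st.2 citation)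

def normalize_citations_py (raw_citations : List String) (allowed_citations : List String) : List String :=
  let allowed_set : PySem.Set String := PySem.Set.ofList (allowed_citations.filter (fun item => item ≠ ""))
  (raw_citations.foldl (pvStepA allowed_set) ([], PySem.Set.empty)).1

-- ===== PORT B =====
-- literal port of B's while loop: `out` accumulator, head of `pending`, later
-- duplicates removed by filtering `pending[1:]`, conditional append to `out`.
def pvGoB (allowed : PySem.Set String) (out : List String) : List String → List String
  | [] => out
  | s :: rest =>
    if (s != "") && PySem.Set.contains allowed s then
      pvGoB allowed (out ++ [s]) (rest.filter (fun t => t ≠ s))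
    else
      pvGoB allowed out (rest.filter (fun t => t ≠ s))
termination_by l => l.length
decreasing_by all_goals
  refine Nat.lt_succ_of_le ?_
  rw [List.length_unattach]
  exact Nat.le_trans (List.length_filter_le _ _) (Nat.le_of_eq List.length_attach)

def normalize_citations_py_alt (raw_citations : List String) (allowed_citations : List String) : List String :=
  let allowed : PySem.Set String := PySem.Set.ofList (allowed_citations.filter (fun x => x ≠ ""))
  pvGoB allowed [] (raw_citations.map (fun x => PySem.Str.strip x))

-- ===== PRECONDITION & SPEC =====
def Spec_normalize_citations_py (raw_citations : List String) (allowed_citations : List String) (out : List String) : Prop := out = normalize_citations_py_alt raw_citations allowed_citations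
instance (raw_citations : List String) (allowed_citations : List String) (out : List String) : Decidable (Spec_normalize_citations_py raw_citations allowed_citations out) := by unfold Spec_normalize_citations_py; infer_instance

-- ===== CLAIM (what is proved, stated in full; the proofs are below) =====
def Claim_equal_normalize_citations_py : Prop := ∀ (raw_citations : List String) (allowed_citations : List String), Dom_normalize_citations_py raw_citations allowed_citations → Spec_normalize_citations_py raw_citations allowed_citations (normalize_citations_py raw_citations allowed_citations)

-- ===== LEMMAS AND PROOFS =====

-- A's fused loop, started on a diagonal state (acc, acc), computes the fold of Set.add
-- over the filtered stripped list (i.e. the ordered dedup of the valid candidates).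
theorem pv_loop_eq (A : PySem.Set String) :
    ∀ (raw : List String) (acc : List String),
      (raw.foldl (pvStepA A) (acc, acc)).1
      = ((raw.map (fun item => PySem.Str.strip item)).filter
          (fun s => (s != "") && PySem.Set.contains A s)).foldl PySem.Set.add acc := by
  intro raw
  induction raw with
  | nil => intro acc; simp
  | cons item rest ih =>
    intro acc
    simp only [List.foldl_cons, List.map_cons]
    by_cases h1 : PySem.Str.strip item = ""
    · have hs : pvStepA A (acc, acc) item = (acc, acc) := by simp [pvStepA, h1]
      have hn : ¬ ((fun s => (s != "") && PySem.Set.contains A s) (PySem.Str.strip item) = true) := by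
        simp [h1]
      rw [hs, List.filter_cons, if_neg hn]
      exact ih acc
    · by_cases h2 : PySem.Set.contains A (PySem.Str.strip item) = true
      · have hm2 : PySem.Str.strip item ∈ A := (PySem.Set.contains_iff _ _).mp h2
        have hp : (fun s => (s != "") && PySem.Set.contains A s) (PySem.Str.strip item) = true := by
          simp [h1, hm2]
        rw [List.filter_cons, if_pos hp, List.foldl_cons]
        by_cases h3 : PySem.Str.strip item ∈ acc
        · have hs : pvStepA A (acc, acc) item = (acc, acc) := by simp [pvStepA, h3]
          rw [hs, PySem.Set.add_of_mem h3]
          exact ih acc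
        · have hs : pvStepA A (acc, acc) item
              = (acc ++ [PySem.Str.strip item], acc ++ [PySem.Str.strip item]) := by
            simp [pvStepA, h1, hm2, h3]
          rw [hs, PySem.Set.add_of_not_mem h3]
          exact ih (acc ++ [PySem.Str.strip item])
      · have hm2 : PySem.Str.strip item ∉ A := fun h => h2 ((PySem.Set.contains_iff _ _).mpr h)
        have hs : pvStepA A (acc, acc) item = (acc, acc) := by simp [pvStepA, hm2]
        have hn : ¬ ((fun s => (s != "") && PySem.Set.contains A s) (PySem.Str.strip item) = true) := by
          simp [hm2]
        rw [hs, List.filter_cons, if_neg hn]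
        exact ih acc

-- folding Set.add over a list ignores elements already in the accumulator
theorem pv_foldl_add_filter (s : String) :
    ∀ (m : List String) (acc : PySem.Set String), s ∈ acc →
      m.foldl PySem.Set.add acc = (m.filter (fun t => t ≠ s)).foldl PySem.Set.add acc := by
  intro m
  induction m with
  | nil => intro acc _; rfl
  | cons t rest ih =>
    intro acc hmem
    by_cases ht : t = s
    · subst ht
      have : PySem.Set.add acc t = acc := PySem.Set.add_of_mem hmem
      simp [List.foldl_cons, this, ih acc hmem]
    · have hmem' : s ∈ PySem.Set.add acc t := by
        rw [PySem.Set.add_eq_ite]; split <;> simp [hmem]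
      simp [ht, List.foldl_cons, ih (PySem.Set.add acc t) hmem']

-- a head element absent from the rest of the list stays in front of the fold
theorem pv_foldl_add_pull (x : String) :
    ∀ (m : List String) (acc : List String), x ∉ m →
      m.foldl PySem.Set.add (x :: acc) = x :: m.foldl PySem.Set.add acc := by
  intro m
  induction m with
  | nil => intro acc _; rfl
  | cons t rest ih =>
    intro acc hx
    have htx : t ≠ x := fun h => hx (h ▸ List.mem_cons_self ..)
    have hrest : x ∉ rest := fun h => hx (List.mem_cons_of_mem _ h)
    have hstep : PySem.Set.add (x :: acc) t = x :: PySem.Set.add acc t := by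
      rw [PySem.Set.add_eq_ite, PySem.Set.add_eq_ite]
      by_cases hm : t ∈ acc
      · simp [hm, htx]
      · have : t ∉ (x :: acc) := by simp [htx, hm]
        simp [hm, this]
    simp only [List.foldl_cons, hstep]
    exact ih (PySem.Set.add acc t) hrest

-- ordered dedup of a cons: the head, then the dedup of the tail with the head's duplicates removed
theorem pv_dedup_cons (s : String) (l : List String) :
    PySem.List.dedup (s :: l) = s :: PySem.List.dedup (l.filter (fun t => t ≠ s)) := by
  rw [PySem.List.dedup_eq_ofList, PySem.List.dedup_eq_ofList,
      PySem.Set.ofList_eq_foldl, PySem.Set.ofList_eq_foldl]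
  have h0 : PySem.Set.add ([] : PySem.Set String) s = [s] := by
    rw [PySem.Set.add_eq_ite]; simp
  have h1 : s ∈ ([s] : PySem.Set String) := by simp
  have h2 : s ∉ l.filter (fun t => t ≠ s) := by simp [List.mem_filter]
  calc (s :: l).foldl PySem.Set.add []
      = l.foldl PySem.Set.add [s] := by simp only [List.foldl_cons, h0]
    _ = (l.filter (fun t => t ≠ s)).foldl PySem.Set.add [s] := pv_foldl_add_filter s l [s] h1
    _ = s :: (l.filter (fun t => t ≠ s)).foldl PySem.Set.add [] := pv_foldl_add_pull s _ [] h2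

-- B's loop computes out ++ dedup of the valid candidates (strong induction on length,
-- since the loop recurses on a filtered, shorter pending list)
theorem pv_goB_eq_aux (A : PySem.Set String) :
    ∀ (n : Nat) (l : List String), l.length ≤ n → ∀ (out : List String),
      pvGoB A out l = out ++ PySem.List.dedup (l.filter (fun s => (s != "") && PySem.Set.contains A s)) := by
  intro n
  induction n with
  | zero =>
    intro l hl out
    have : l = [] := List.eq_nil_of_length_eq_zero (Nat.le_zero.mp hl)
    subst this
    simp [pvGoB, PySem.List.dedup, PySem.Set.ofList]
  | succ n ihn =>
    intro l hl out
    cases l with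
    | nil => simp [pvGoB, PySem.List.dedup, PySem.Set.ofList]
    | cons s rest =>
      have hrest : (rest.filter (fun t => t ≠ s)).length ≤ n :=
        Nat.le_trans (List.length_filter_le _ _) (Nat.le_of_succ_le_succ hl)
      by_cases hvalid : ((s != "") && PySem.Set.contains A s) = true
      · rw [pvGoB, if_pos hvalid, ihn _ hrest]
        have hfc : (s :: rest).filter (fun t => (t != "") && PySem.Set.contains A t)
            = s :: rest.filter (fun t => (t != "") && PySem.Set.contains A t) := by
          rw [List.filter_cons, if_pos hvalid]
        rw [hfc, pv_dedup_cons, List.filter_comm]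
        simp
      · rw [pvGoB, if_neg hvalid, ihn _ hrest]
        have hfc : (s :: rest).filter (fun t => (t != "") && PySem.Set.contains A t)
            = rest.filter (fun t => (t != "") && PySem.Set.contains A t) := by
          rw [List.filter_cons, if_neg hvalid]
        rw [hfc]
        have heq : (rest.filter (fun t => t ≠ s)).filter (fun t => (t != "") && PySem.Set.contains A t)
            = rest.filter (fun t => (t != "") && PySem.Set.contains A t) := by
          rw [List.filter_comm]
          apply List.filter_eq_self.mpr
          intro a ha
          have hv : ((a != "") && PySem.Set.contains A a) = true := (List.mem_filter.mp ha).2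
          simp only [decide_eq_true_eq]
          exact fun h => hvalid (h ▸ hv)
        rw [heq]

theorem pv_goB_eq (A : PySem.Set String) (l out : List String) :
    pvGoB A out l = out ++ PySem.List.dedup (l.filter (fun s => (s != "") && PySem.Set.contains A s)) :=
  pv_goB_eq_aux A l.length l Nat.le.refl out

-- ===== VERDICT (by name: the statement is the Claim_ definition above) =====
theorem normalize_citations_py_spec : Claim_equal_normalize_citations_py := by
  intro raw allowed _
  show normalize_citations_py raw allowed = normalize_citations_py_alt raw allowed
  simp only [normalize_citations_py, normalize_citations_py_alt, pv_goB_eq,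
    PySem.List.dedup_eq_ofList, PySem.Set.ofList_eq_foldl, List.nil_append]
  exact pv_loop_eq _ raw []
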